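-- pv_equiv track=rewrite | github.com/getcontinuo/continuo | core/recognition_runtime.py | _contains_token_subsequence
-- ===== SOURCE A (Python) =====
-- def _contains_token_subsequence(haystack: list[str], needle: list[str]) -> bool:
--     """Return True iff ``needle`` appears as a contiguous run within ``haystack``."""
--     if not needle or len(needle) > len(haystack):
--         return False
--     n = len(needle)
--     for i in range(len(haystack) - n + 1):
--         if haystack[i : i + n] == needle:
--             return True
--     return False
-- ===== SOURCE B (Python) =====
-- def _contains_token_subsequence(haystack, needle):
--     """One left-to-right pass over haystack; `active` holds the lengths of
--     needle-prefixes that end at the current position (NFA-style scan, no slices)."""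
--     if not needle:
--         return False
--     n = len(needle)
--     active = set()
--     for tok in haystack:
--         active = {l + 1 for l in active | {0} if needle[l] == tok}
--         if n in active:
--             return True
--     return False
-- ===== Notes on version B (the rewrite author's own statement) =====
-- stated objective: alternative
-- what changed: Replaced the index-window loop that compares a fresh slice haystack[i:i+n] against needle at every start position by a single left-to-right pass that maintains the set of needle-prefix lengths currently matching (an NFA-style scan with no slicing).
import Mathlib
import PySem

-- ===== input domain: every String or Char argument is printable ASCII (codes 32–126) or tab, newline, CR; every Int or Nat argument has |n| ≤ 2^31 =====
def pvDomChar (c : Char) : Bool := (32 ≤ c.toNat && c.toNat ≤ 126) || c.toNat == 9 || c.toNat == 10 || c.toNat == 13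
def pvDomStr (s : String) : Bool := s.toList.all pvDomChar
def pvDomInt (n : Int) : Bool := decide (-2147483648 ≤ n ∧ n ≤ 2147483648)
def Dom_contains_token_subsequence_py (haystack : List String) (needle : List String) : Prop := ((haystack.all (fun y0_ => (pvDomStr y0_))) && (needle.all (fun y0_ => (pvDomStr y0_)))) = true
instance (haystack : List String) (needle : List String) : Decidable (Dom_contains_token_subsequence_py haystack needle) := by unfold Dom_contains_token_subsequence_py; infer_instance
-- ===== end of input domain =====

-- B replaces A's sliding index window with slice comparisons by a single left-to-right
-- pass maintaining the set of needle-prefix lengths currently matching (alternative algorithm, same worst-case cost).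

-- ===== PORT A =====
-- the `for i in range(...)` loop with its early `return True`
def pvAGo (haystack needle : List String) (nn : Int) : List Int → Bool
  | [] => false
  | i :: rest =>
    if PySem.List.slice haystack (some i) (some (i + nn)) == needle then true
    else pvAGo haystack needle nn rest

def contains_token_subsequence_py (haystack : List String) (needle : List String) : Bool :=
  if needle.isEmpty || (needle.length : Int) > (haystack.length : Int) then false
  else pvAGo haystack needle (needle.length : Int)
        (PySem.List.pyRange 0 ((haystack.length : Int) - (needle.length : Int) + 1) 1)

-- ===== PORT B =====
-- {l + 1 for l in active | {0} if needle[l] == tok}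
-- (needle[l] is always in range here: every l in active∪{0} satisfies 0 ≤ l < len(needle),
--  so the `.getD ""` default is never consulted)
def pvStep (needle : List String) (tok : String) (active : PySem.Set Int) : PySem.Set Int :=
  PySem.Set.ofList
    (((PySem.Set.union active [(0 : Int)]).filter
        (fun l => (PySem.List.pyGet? needle l).getD "" == tok)).map (fun l => l + 1))

-- the `for tok in haystack` loop with its early `return True`
def pvBLoop (needle : List String) (nn : Int) : List String → PySem.Set Int → Bool
  | [], _ => false
  | tok :: rest, active =>
    let a' := pvStep needle tok active
    if PySem.Set.contains a' nn then true else pvBLoop needle nn rest a'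

def contains_token_subsequence_py_alt (haystack : List String) (needle : List String) : Bool :=
  if needle.isEmpty then false
  else pvBLoop needle (needle.length : Int) haystack PySem.Set.empty

-- ===== PRECONDITION & SPEC =====
def Spec_contains_token_subsequence_py (haystack : List String) (needle : List String) (out : Bool) : Prop := out = contains_token_subsequence_py_alt haystack needle
instance (haystack : List String) (needle : List String) (out : Bool) : Decidable (Spec_contains_token_subsequence_py haystack needle out) := by unfold Spec_contains_token_subsequence_py; infer_instance

-- ===== CLAIM (what is proved, stated in full; the proofs are below) =====
def Claim_equal_contains_token_subsequence_py : Prop := ∀ (haystack : List String) (needle : List String), Dom_contains_token_subsequence_py haystack needle → Spec_contains_token_subsequence_py haystack needle (contains_token_subsequence_py haystack needle)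

-- ===== LEMMAS AND PROOFS =====

-- ---- A-side: A = true ↔ needle ≠ [] ∧ needle <:+: haystack ----

theorem pvAGo_eq_any (h n : List String) (nn : Int) (l : List Int) :
    pvAGo h n nn l = l.any (fun i => PySem.List.slice h (some i) (some (i + nn)) == n) := by
  induction l with
  | nil => rfl
  | cons i rest ih => simp only [pvAGo, List.any_cons]; split_ifs with hi <;> simp [hi, ih]

theorem pvA_true_iff (h n : List String) :
    contains_token_subsequence_py h n = true ↔ n ≠ [] ∧ n <:+: h := by
  unfold contains_token_subsequence_py
  split_ifs with hcond
  · simp only [false_iff]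
    rintro ⟨hne, hinf⟩
    rcases Bool.or_eq_true_iff.mp hcond with hc | hc
    · exact hne (List.isEmpty_iff.mp hc)
    · have h1 : (n.length : Int) > (h.length : Int) := of_decide_eq_true hc
      have h2 : (n.length : Int) ≤ (h.length : Int) := by exact_mod_cast hinf.length_le
      omega
  · simp only [Bool.or_eq_true, not_or, List.isEmpty_iff, decide_eq_true_eq, not_lt] at hcond
    obtain ⟨hne, hlenI⟩ := hcond
    have hlen : n.length ≤ h.length := by exact_mod_cast hlenI
    rw [pvAGo_eq_any, List.any_eq_true]
    constructor
    · rintro ⟨i, hi, hslice⟩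
      rw [PySem.List.mem_pyRange_one] at hi
      obtain ⟨k, rfl⟩ := Int.eq_ofNat_of_zero_le hi.1
      rw [PySem.List.slice_natCast_add] at hslice
      have heq : (h.drop k).take n.length = n := by simpa using hslice
      refine ⟨hne, ⟨h.take k, (h.drop k).drop n.length, ?_⟩⟩
      calc h.take k ++ n ++ (h.drop k).drop n.length
          = h.take k ++ ((h.drop k).take n.length ++ (h.drop k).drop n.length) := by
            rw [heq, List.append_assoc]
        _ = h := by rw [List.take_append_drop, List.take_append_drop]
    · rintro ⟨_, s, t, heq⟩
      refine ⟨(s.length : Int), ?_, ?_⟩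
      · rw [PySem.List.mem_pyRange_one]
        have hl : s.length + (n.length + t.length) = h.length := by
          simpa using congrArg List.length heq
        constructor
        · exact_mod_cast Int.natCast_nonneg s.length
        · omega
      · rw [PySem.List.slice_natCast_add]
        have hd : h.drop s.length = n ++ t := by
          rw [← heq, List.append_assoc, List.drop_left]
        rw [hd, List.take_left' rfl]
        simp

-- ---- B-side: the NFA-scan invariant ----

theorem suffix_concat_iff {α : Type} (u c : List α) (b a : α) :
    u ++ [b] <:+ c ++ [a] ↔ u <:+ c ∧ b = a := by
  rw [← List.reverse_prefix]
  simp only [List.reverse_append, List.reverse_cons, List.reverse_nil, List.nil_append,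
    List.cons_append]
  rw [List.cons_prefix_cons, List.reverse_prefix]
  tauto

theorem take_succ_suffix (needle c : List String) (tok : String) (k : Nat)
    (hk : k < needle.length) :
    needle.take (k + 1) <:+ c ++ [tok] ↔ needle.take k <:+ c ∧ needle[k] = tok := by
  rw [List.take_add_one, List.getElem?_eq_getElem hk]
  simp only [Option.toList_some]
  exact suffix_concat_iff (needle.take k) c needle[k] tok

-- the loop invariant: `active` is exactly the set of proper nonempty needle-prefix
-- lengths that are suffixes of the consumed part `c`
def pvInv (needle c : List String) (active : List Int) : Prop :=
  ∀ l : Int, l ∈ active ↔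
    ∃ k : Nat, l = (k : Int) ∧ 0 < k ∧ k < needle.length ∧ needle.take k <:+ c

theorem mem_pvStep (needle c : List String) (tok : String) (active : PySem.Set Int)
    (hne : needle ≠ []) (hInv : pvInv needle c active) (l : Int) :
    l ∈ pvStep needle tok active ↔
      ∃ k : Nat, l = (k : Int) ∧ 0 < k ∧ k ≤ needle.length ∧ needle.take k <:+ c ++ [tok] := by
  have hpos : 0 < needle.length := List.length_pos_iff.mpr hne
  simp only [pvStep, PySem.Set.mem_ofList, List.mem_map, List.mem_filter,
    PySem.Set.mem_union, List.mem_singleton]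
  constructor
  · rintro ⟨l0, ⟨hl0, hget⟩, rfl⟩
    have hk0 : ∃ k0 : Nat, l0 = (k0 : Int) ∧ k0 < needle.length ∧ needle.take k0 <:+ c := by
      rcases hl0 with hl0 | rfl
      · obtain ⟨k0, rfl, _, hlt, hsuf⟩ := (hInv l0).mp hl0
        exact ⟨k0, rfl, hlt, hsuf⟩
      · exact ⟨0, by simp, hpos, List.nil_suffix⟩
    obtain ⟨k0, rfl, hlt, hsuf⟩ := hk0
    rw [PySem.List.pyGet?_natCast, List.getElem?_eq_getElem hlt] at hget
    have htok : needle[k0] = tok := by simpa using hget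
    exact ⟨k0 + 1, by push_cast; ring, Nat.succ_pos _, by omega,
      (take_succ_suffix needle c tok k0 hlt).mpr ⟨hsuf, htok⟩⟩
  · rintro ⟨k, rfl, hkpos, hkle, hsuf⟩
    obtain ⟨k0, rfl⟩ : ∃ k0, k = k0 + 1 := ⟨k - 1, by omega⟩
    have hlt : k0 < needle.length := by omega
    obtain ⟨hsuf0, htok⟩ := (take_succ_suffix needle c tok k0 hlt).mp hsuf
    refine ⟨(k0 : Int), ⟨?_, ?_⟩, by push_cast; ring⟩
    · rcases Nat.eq_zero_or_pos k0 with rfl | hk0pos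
      · right; rfl
      · left; exact (hInv (k0 : Int)).mpr ⟨k0, rfl, hk0pos, hlt, hsuf0⟩
    · rw [PySem.List.pyGet?_natCast, List.getElem?_eq_getElem hlt]
      simpa using htok

theorem pvBLoop_iff (needle : List String) (hne : needle ≠ []) :
    ∀ (rest c : List String) (active : PySem.Set Int), pvInv needle c active →
      (pvBLoop needle (needle.length : Int) rest active = true ↔
        ∃ j : Nat, 0 < j ∧ j ≤ rest.length ∧ needle <:+ c ++ rest.take j) := by
  intro rest
  induction rest with
  | nil =>
    intro c active _
    simp only [pvBLoop, Bool.false_eq_true, false_iff]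
    rintro ⟨j, hj, hjle, _⟩
    simp at hjle; omega
  | cons tok rest' ih =>
    intro c active hInv
    have hmem := mem_pvStep needle c tok active hne hInv
    have hfull : PySem.Set.contains (pvStep needle tok active) (needle.length : Int) = true ↔
        needle <:+ c ++ [tok] := by
      rw [PySem.Set.contains_iff, hmem]
      constructor
      · rintro ⟨k, hk, _, _, hsuf⟩
        have : k = needle.length := by exact_mod_cast hk.symm
        subst this
        simpa [List.take_length] using hsuf
      · intro hsuf
        exact ⟨needle.length, rfl, List.length_pos_iff.mpr hne, le_refl _,
          by simpa [List.take_length] using hsuf⟩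
    simp only [pvBLoop]
    by_cases hc : needle <:+ c ++ [tok]
    · rw [if_pos (hfull.mpr hc)]
      simp only [true_iff]
      exact ⟨1, Nat.one_pos, by simp, by simpa using hc⟩
    · rw [if_neg (fun hcon => hc (hfull.mp hcon))]
      have hInv' : pvInv needle (c ++ [tok]) (pvStep needle tok active) := by
        intro l
        rw [hmem l]
        constructor
        · rintro ⟨k, rfl, hkpos, hkle, hsuf⟩
          refine ⟨k, rfl, hkpos, ?_, hsuf⟩
          rcases Nat.lt_or_ge k needle.length with hlt | hge
          · exact hlt
          · exfalso
            have : k = needle.length := by omega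
            subst this
            exact hc (by simpa [List.take_length] using hsuf)
        · rintro ⟨k, rfl, hkpos, hklt, hsuf⟩
          exact ⟨k, rfl, hkpos, Nat.le_of_lt hklt, hsuf⟩
      rw [ih (c ++ [tok]) (pvStep needle tok active) hInv']
      constructor
      · rintro ⟨j, hjpos, hjle, hsuf⟩
        refine ⟨j + 1, Nat.succ_pos _, by simpa using Nat.succ_le_succ hjle, ?_⟩
        simpa [List.take_succ_cons, List.append_assoc] using hsuf
      · rintro ⟨j, hjpos, hjle, hsuf⟩
        obtain ⟨j', rfl⟩ : ∃ j', j = j' + 1 := ⟨j - 1, by omega⟩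
        rw [List.take_succ_cons] at hsuf
        rcases Nat.eq_zero_or_pos j' with rfl | hj'pos
        · exact absurd (by simpa using hsuf) hc
        · refine ⟨j', hj'pos, by simpa using Nat.le_of_succ_le_succ hjle, ?_⟩
          simpa [List.append_assoc] using hsuf

theorem pvB_true_iff (h n : List String) :
    contains_token_subsequence_py_alt h n = true ↔ n ≠ [] ∧ n <:+: h := by
  unfold contains_token_subsequence_py_alt
  split_ifs with hemp
  · simp [List.isEmpty_iff.mp hemp]
  · have hne : n ≠ [] := fun hnil => hemp (by simp [hnil])
    have hInv0 : pvInv n [] PySem.Set.empty := by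
      intro l
      simp only [PySem.Set.empty, List.not_mem_nil, false_iff]
      rintro ⟨k, _, hkpos, _, hsuf⟩
      have := List.suffix_nil.mp hsuf
      rcases List.take_eq_nil_iff.mp this with h1 | h1
      · omega
      · exact hne h1
    rw [pvBLoop_iff n hne h [] PySem.Set.empty hInv0]
    constructor
    · rintro ⟨j, _, _, hsuf⟩
      simp only [List.nil_append] at hsuf
      exact ⟨hne, hsuf.isInfix.trans (h.take_prefix j).isInfix⟩
    · rintro ⟨_, s, t, heq⟩
      refine ⟨s.length + n.length, by
          have := List.length_pos_iff.mpr hne; omega, ?_, ?_⟩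
      · have hl : s.length + (n.length + t.length) = h.length := by
          simpa using congrArg List.length heq
        omega
      · have hd : h.take (s.length + n.length) = s ++ n := by
          rw [← heq, List.append_assoc, List.take_append,
            List.take_of_length_le (by omega)]
          congr 1
          rw [show s.length + n.length - s.length = n.length by omega]
          exact List.take_left' rfl
        simp only [List.nil_append, hd]
        exact List.suffix_append s n

-- ===== VERDICT (by name: the statement is the Claim_ definition above) =====
theorem contains_token_subsequence_py_spec : Claim_equal_contains_token_subsequence_py := by
  intro h n _
  unfold Spec_contains_token_subsequence_py
  rw [Bool.eq_iff_iff, pvA_true_iff, pvB_true_iff]
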